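-- pv_equiv track=rewrite | github.com/boat-sirapob/advent-of-code-2023 | 02/part2.py | min_possible
-- ===== SOURCE A (Python) =====
-- def min_possible(game):
--     min_colors = {}
--     for game_set in game:
--         for color, amount in game_set.items():
--             try:
--                 min_colors[color] = max(min_colors[color], amount)
--             except KeyError:
--                 min_colors[color] = amount
--
--     return min_colors
-- ===== SOURCE B (Python) =====
-- def min_possible(game):
--     # Phase 1: group every amount by color (no max computed yet).
--     grouped = {}
--     for game_set in game:
--         for color, amount in game_set.items():
--             grouped.setdefault(color, []).append(amount)
--     # Phase 2: reduce each group to its maximum.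
--     return {color: max(amounts) for color, amounts in grouped.items()}
-- ===== Notes on version B (the rewrite author's own statement) =====
-- stated objective: alternative
-- what changed: Replaces the fused loop that keeps a running max per color with a two-phase build-then-reduce: one pass groups all amounts into color->list via setdefault/append, then a dict comprehension reduces each list with max().
import Mathlib
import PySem

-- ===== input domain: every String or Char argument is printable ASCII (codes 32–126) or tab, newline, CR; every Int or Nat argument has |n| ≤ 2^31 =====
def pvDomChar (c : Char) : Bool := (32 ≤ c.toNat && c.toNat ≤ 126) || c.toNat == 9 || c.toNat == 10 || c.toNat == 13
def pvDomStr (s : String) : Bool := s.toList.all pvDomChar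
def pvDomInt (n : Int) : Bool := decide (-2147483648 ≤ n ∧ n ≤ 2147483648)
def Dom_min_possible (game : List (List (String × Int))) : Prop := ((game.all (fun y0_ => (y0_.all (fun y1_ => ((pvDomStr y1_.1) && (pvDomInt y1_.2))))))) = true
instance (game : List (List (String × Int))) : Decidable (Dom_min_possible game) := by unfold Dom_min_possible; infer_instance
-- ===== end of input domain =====

-- B replaces A's fused running-max loop by a two-phase build-then-reduce (group amounts per color, then take each group's max); alternative decomposition, same cost.


-- ===== PORT A =====
-- loop body of A: try max(min_colors[color], amount) / except KeyError: amount, then store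
def pvStepA (d : PySem.Dict String Int) (p : String × Int) : PySem.Dict String Int :=
  match d.get? p.1 with
  | some m => d.insert p.1 (max m p.2)      -- the try branch (Python max(x, y) has this value on ints)
  | none   => d.insert p.1 p.2              -- except KeyError

def min_possible (game : List (List (String × Int))) : List (String × Int) :=
  (game.foldl (fun min_colors game_set => game_set.foldl pvStepA min_colors) PySem.Dict.empty).items

-- ===== PORT B =====
-- Python max(vs) on a nonempty list of ints; the [] default is never reached by min_possible_alt
def pvPyMax (vs : List Int) : Int := (PySem.List.max? vs id).getD 0

-- loop body of B's phase 1: grouped.setdefault(color, []).append(amount)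
def pvStepB (g : PySem.Dict String (List Int)) (p : String × Int) : PySem.Dict String (List Int) :=
  g.modify p.1 [] (· ++ [p.2])

def min_possible_alt (game : List (List (String × Int))) : List (String × Int) :=
  let grouped := game.foldl (fun grouped game_set => game_set.foldl pvStepB grouped) PySem.Dict.empty
  -- the dict comprehension {color: max(amounts) …}: grouped's keys are distinct, so its items are this map
  grouped.items.map (fun p => (p.1, pvPyMax p.2))

-- ===== PRECONDITION & SPEC =====
def Spec_min_possible (game : List (List (String × Int))) (out : List (String × Int)) : Prop := out = min_possible_alt game
instance (game : List (List (String × Int))) (out : List (String × Int)) : Decidable (Spec_min_possible game out) := by unfold Spec_min_possible; infer_instance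

-- ===== CLAIM (what is proved, stated in full; the proofs are below) =====
def Claim_equal_min_possible : Prop := ∀ (game : List (List (String × Int))), Dom_min_possible game → Spec_min_possible game (min_possible game)

-- ===== LEMMAS AND PROOFS =====

-- the value map linking B's groups to A's running maxima
def pvRed (p : String × List Int) : String × Int := (p.1, pvPyMax p.2)

theorem pvMax?_cons (xs : List Int) : ∀ m : Int, PySem.List.max? (m :: xs) id = some (xs.foldl max m) := by
  induction xs with
  | nil => intro m; rfl
  | cons x xs ih =>
      intro m
      simp only [PySem.List.max?, List.foldl_cons] at ih ⊢
      by_cases h : m < x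
      · simp only [id, if_pos h, max_eq_right (le_of_lt h)]
        exact ih x
      · simp only [id, if_neg h, max_eq_left (le_of_not_gt h)]
        exact ih m

theorem pvPyMax_cons (x : Int) (xs : List Int) : pvPyMax (x :: xs) = xs.foldl max x := by
  rw [pvPyMax, pvMax?_cons]
  rfl

theorem pvPyMax_append (vs : List Int) (h : vs ≠ []) (a : Int) :
    pvPyMax (vs ++ [a]) = max (pvPyMax vs) a := by
  cases vs with
  | nil => exact absurd rfl h
  | cons x xs => simp [pvPyMax_cons, List.foldl_append]

theorem pvGet?_map (l : List (String × List Int)) (c : String) :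
    (PySem.Dict.mk (l.map pvRed)).get? c = ((PySem.Dict.mk l).get? c).map pvPyMax := by
  simp only [PySem.Dict.get?, List.find?_map]
  have : ((fun p : String × Int => p.1 == c) ∘ pvRed) = (fun p : String × List Int => p.1 == c) := by
    funext p; rfl
  rw [this]
  cases List.find? (fun p : String × List Int => p.1 == c) l <;> rfl

theorem pvContains_map (l : List (String × List Int)) (c : String) :
    (PySem.Dict.mk (l.map pvRed)).contains c = (PySem.Dict.mk l).contains c := by
  rw [PySem.Dict.contains_eq_isSome_get?, PySem.Dict.contains_eq_isSome_get?, pvGet?_map]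
  cases (PySem.Dict.mk l).get? c <;> rfl

-- one step: A's fused update on the reduced dict mirrors B's grouping update
theorem pvStep_comm (l : List (String × List Int)) (h : ∀ p ∈ l, p.2 ≠ []) (q : String × Int) :
    pvStepA (PySem.Dict.mk (l.map pvRed)) q = PySem.Dict.mk ((pvStepB (PySem.Dict.mk l) q).items.map pvRed) := by
  obtain ⟨c, a⟩ := q
  have hmod : pvStepB (PySem.Dict.mk l) (c, a)
      = (PySem.Dict.mk l).insert c (((PySem.Dict.mk l).getD c []) ++ [a]) := rfl
  cases hg : (PySem.Dict.mk l).get? c with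
  | none =>
      have hc : (PySem.Dict.mk l).contains c = false := by
        rw [PySem.Dict.contains_eq_isSome_get?, hg]; rfl
      have hcm : (PySem.Dict.mk (l.map pvRed)).contains c = false := by
        rw [pvContains_map]; exact hc
      simp only [pvStepA, pvGet?_map, hg, Option.map_none, hmod,
        PySem.Dict.getD_eq_get?_getD, Option.getD_none,
        PySem.Dict.insert, hc, Bool.false_eq_true, if_false, hcm]
      simp [pvRed, pvPyMax, PySem.List.max?, id]
  | some vs =>
      have hvs : vs ≠ [] := by
        simp only [PySem.Dict.get?] at hg
        obtain ⟨p, hp, hp2⟩ := Option.map_eq_some_iff.mp hg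
        have hmem := List.mem_of_find?_eq_some hp
        have hne := h p hmem
        rwa [hp2] at hne
      have hc : (PySem.Dict.mk l).contains c = true := by
        rw [PySem.Dict.contains_eq_isSome_get?, hg]; rfl
      have hcm : (PySem.Dict.mk (l.map pvRed)).contains c = true := by
        rw [pvContains_map]; exact hc
      have hgd : (PySem.Dict.mk l).getD c [] = vs := by
        rw [PySem.Dict.getD_eq_get?_getD, hg]; rfl
      simp only [pvStepA, pvGet?_map, hg, Option.map_some, hmod, hgd,
        PySem.Dict.insert, hc, hcm, if_true]
      congr 1
      rw [List.map_map, List.map_map]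
      apply List.map_congr_left
      intro p _
      simp only [Function.comp]
      by_cases hp : p.1 = c
      · have hb : (p.1 == c) = true := by simp [hp]
        have hb2 : ((pvRed p).1 == c) = true := by simp [pvRed, hp]
        simp only [hb, if_true, pvRed, pvPyMax_append vs hvs]
      · have hb : (p.1 == c) = false := by simp [hp]
        have hb2 : ((pvRed p).1 == c) = false := by simp [pvRed, hp]
        simp only [hb, hb2, Bool.false_eq_true, if_false]

theorem pvInv_step (l : List (String × List Int)) (h : ∀ p ∈ l, p.2 ≠ []) (q : String × Int) :
    ∀ p ∈ (pvStepB (PySem.Dict.mk l) q).items, p.2 ≠ [] := by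
  obtain ⟨c, a⟩ := q
  intro p hp
  simp only [pvStepB, PySem.Dict.modify, PySem.Dict.insert] at hp
  split at hp
  · obtain ⟨p', hp', hpe⟩ := List.mem_map.mp hp
    split at hpe
    · cases hpe; simp
    · cases hpe; exact h _ hp'
  · rcases List.mem_append.mp hp with h1 | h1
    · exact h _ h1
    · simp only [List.mem_singleton] at h1; cases h1; simp

-- the flattened loop: A's fold from the reduced dict equals the reduction of B's fold
theorem pvLoop (ps : List (String × Int)) :
    ∀ (l : List (String × List Int)), (∀ p ∈ l, p.2 ≠ []) →
    ps.foldl pvStepA (PySem.Dict.mk (l.map pvRed))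
      = PySem.Dict.mk ((ps.foldl pvStepB (PySem.Dict.mk l)).items.map pvRed) := by
  induction ps with
  | nil => intro l _; rfl
  | cons q ps ih =>
      intro l h
      simp only [List.foldl_cons]
      rw [pvStep_comm l h q]
      have : pvStepB (PySem.Dict.mk l) q = PySem.Dict.mk ((pvStepB (PySem.Dict.mk l) q).items) := rfl
      rw [ih ((pvStepB (PySem.Dict.mk l) q).items) (pvInv_step l h q), ← this]

theorem pvNested {α β : Type} (step : β → α → β) (game : List (List α)) (d : β) :
    game.foldl (fun d gs => gs.foldl step d) d = game.flatten.foldl step d := by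
  induction game generalizing d with
  | nil => rfl
  | cons gs game ih => simp [List.foldl_cons, List.flatten_cons, List.foldl_append, ih]

-- ===== VERDICT (by name: the statement is the Claim_ definition above) =====
theorem min_possible_spec : Claim_equal_min_possible := by
  intro game _
  unfold Spec_min_possible min_possible min_possible_alt
  rw [pvNested pvStepA, pvNested pvStepB]
  have h0 : (PySem.Dict.empty : PySem.Dict String Int)
      = PySem.Dict.mk (([] : List (String × List Int)).map pvRed) := rfl
  rw [h0, pvLoop game.flatten [] (by intro p hp; cases hp)]
  rfl
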